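-- pv_equiv track=rewrite | github.com/IvoAP/Graph_Applications | Activity 1/isomorphism.py | check_degree_of_graphs
-- ===== SOURCE A (Python) =====
-- def check_degree_of_graphs(matrix1, matrix2 , number_vertices1, number_vertices2):
--     degree_graph1 = [0] * number_vertices1
--     degree_graph2 = [0] * number_vertices2
--
--     for i, row in enumerate(matrix1):
--         degree_graph1[i] = row.count(1)
--
--     for i, row in enumerate(matrix2):
--         degree_graph2[i] = row.count(1)
--
--     degree_graph1.sort()
--     degree_graph2.sort()
--
--     return  degree_graph1 == degree_graph2
-- ===== SOURCE B (Python) =====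
-- def check_degree_of_graphs(matrix1, matrix2, number_vertices1, number_vertices2):
--     return (_degree_histogram(matrix1, number_vertices1)
--             == _degree_histogram(matrix2, number_vertices2))
--
-- def _degree_histogram(matrix, number_vertices):
--     degrees = [0] * number_vertices
--     for i in range(len(matrix)):
--         degrees[i] = matrix[i].count(1)
--     hist = {}
--     for d in degrees:
--         hist[d] = hist.get(d, 0) + 1
--     return hist
-- ===== Notes on version B (the rewrite author's own statement) =====
-- stated objective: alternative
-- what changed: B keeps the degree-list construction but decides permutation equality of the two degree sequences by building and comparing frequency histograms (Counter-style dicts) instead of sorting both lists and comparing them element-wise.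
import Mathlib
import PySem

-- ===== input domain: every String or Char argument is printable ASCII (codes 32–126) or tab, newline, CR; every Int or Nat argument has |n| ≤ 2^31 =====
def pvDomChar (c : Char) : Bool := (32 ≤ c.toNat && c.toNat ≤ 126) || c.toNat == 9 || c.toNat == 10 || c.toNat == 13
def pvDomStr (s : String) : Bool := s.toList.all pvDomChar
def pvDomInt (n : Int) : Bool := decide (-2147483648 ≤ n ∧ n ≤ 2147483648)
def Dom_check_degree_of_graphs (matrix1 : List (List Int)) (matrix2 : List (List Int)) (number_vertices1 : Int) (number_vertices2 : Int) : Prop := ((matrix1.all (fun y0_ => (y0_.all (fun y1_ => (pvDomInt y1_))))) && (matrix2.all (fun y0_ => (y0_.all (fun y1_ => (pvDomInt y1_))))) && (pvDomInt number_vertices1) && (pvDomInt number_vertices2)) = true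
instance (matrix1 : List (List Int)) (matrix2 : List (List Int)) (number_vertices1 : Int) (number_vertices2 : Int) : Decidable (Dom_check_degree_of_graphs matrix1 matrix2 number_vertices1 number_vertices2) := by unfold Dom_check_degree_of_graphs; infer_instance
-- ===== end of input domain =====

-- B decides permutation equality of the two degree sequences by building and comparing frequency
-- histograms (Counter-style dicts) instead of A's sort-both-lists-and-compare final pass.

-- ===== PORT A =====
-- 'for i, row in enumerate(matrix): degree[i] = row.count(1)' as structural recursion over the rows
def pvFillDegrees (rows : List (List Int)) (i : Nat) (d : List Int) : List Int :=
  match rows with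
  | [] => d
  | r :: rest => pvFillDegrees rest (i + 1) (d.set i ((PySem.List.count r 1 : Nat) : Int))

def check_degree_of_graphs (matrix1 : List (List Int)) (matrix2 : List (List Int)) (number_vertices1 : Int) (number_vertices2 : Int) : Bool :=
  let degree_graph1 := pvFillDegrees matrix1 0 (List.replicate number_vertices1.toNat 0)
  let degree_graph2 := pvFillDegrees matrix2 0 (List.replicate number_vertices2.toNat 0)
  -- '.sort()' is Python's stable ascending sort, ported as Lean's stable List.mergeSort (exact:
  -- a stable ascending sort of an int list has a unique output list)
  degree_graph1.mergeSort (fun a b => decide (a ≤ b)) == degree_graph2.mergeSort (fun a b => decide (a ≤ b))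

-- ===== PORT B =====
def pvDegreeHistogram (matrix : List (List Int)) (number_vertices : Int) : PySem.Dict Int Int :=
  let degrees := List.replicate number_vertices.toNat (0 : Int)
  -- 'for i in range(len(matrix)): degrees[i] = matrix[i].count(1)' (i is always a valid index of matrix)
  let degrees := (PySem.List.pyRange 0 matrix.length 1).foldl
    (fun d i => d.set i.toNat ((PySem.List.count (PySem.List.pyGetD matrix i []) 1 : Nat) : Int)) degrees
  degrees.foldl (fun hist d => hist.insert d (hist.getD d 0 + 1)) PySem.Dict.empty

-- Python's 'dict1 == dict2' ignores insertion order: equal sizes and every entry of the first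
-- found in the second (exact, since dict keys are unique)
def pvDictEq (h1 h2 : PySem.Dict Int Int) : Bool :=
  h1.size == h2.size && h1.items.all (fun p => h2.get? p.1 == some p.2)

def check_degree_of_graphs_alt (matrix1 : List (List Int)) (matrix2 : List (List Int)) (number_vertices1 : Int) (number_vertices2 : Int) : Bool :=
  pvDictEq (pvDegreeHistogram matrix1 number_vertices1) (pvDegreeHistogram matrix2 number_vertices2)

-- ===== PRECONDITION & SPEC =====
-- Pre_ excludes exactly the inputs where A raises IndexError: a nonempty matrix with more rows than
-- its declared vertex count (the preallocated degree list is too short).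
def Pre_check_degree_of_graphs (matrix1 : List (List Int)) (matrix2 : List (List Int)) (number_vertices1 : Int) (number_vertices2 : Int) : Prop :=
  (matrix1 = [] ∨ (matrix1.length : Int) ≤ number_vertices1) ∧
  (matrix2 = [] ∨ (matrix2.length : Int) ≤ number_vertices2)
instance (matrix1 : List (List Int)) (matrix2 : List (List Int)) (number_vertices1 : Int) (number_vertices2 : Int) : Decidable (Pre_check_degree_of_graphs matrix1 matrix2 number_vertices1 number_vertices2) := by unfold Pre_check_degree_of_graphs; infer_instance

def pvWitness_check_degree_of_graphs : List (List Int) × List (List Int) × Int × Int :=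
  ([[1, 0], [1, 1]], [[1, 1], [0, 1]], 2, 2)

def Spec_check_degree_of_graphs (matrix1 : List (List Int)) (matrix2 : List (List Int)) (number_vertices1 : Int) (number_vertices2 : Int) (out : Bool) : Prop := out = check_degree_of_graphs_alt matrix1 matrix2 number_vertices1 number_vertices2
instance (matrix1 : List (List Int)) (matrix2 : List (List Int)) (number_vertices1 : Int) (number_vertices2 : Int) (out : Bool) : Decidable (Spec_check_degree_of_graphs matrix1 matrix2 number_vertices1 number_vertices2 out) := by unfold Spec_check_degree_of_graphs; infer_instance

-- ===== CLAIM (what is proved, stated in full; the proofs are below) =====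
def Claim_equal_check_degree_of_graphs : Prop := ∀ (matrix1 : List (List Int)) (matrix2 : List (List Int)) (number_vertices1 : Int) (number_vertices2 : Int), Dom_check_degree_of_graphs matrix1 matrix2 number_vertices1 number_vertices2 → Pre_check_degree_of_graphs matrix1 matrix2 number_vertices1 number_vertices2 → Spec_check_degree_of_graphs matrix1 matrix2 number_vertices1 number_vertices2 (check_degree_of_graphs matrix1 matrix2 number_vertices1 number_vertices2)

-- ===== LEMMAS AND PROOFS =====

-- B's index loop computes the same degree list as A's enumerate loop
lemma foldl_enumerate_set :
    ∀ (m : List (List Int)) (i : Nat) (d : List Int),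
      (PySem.List.enumerate m (i : Int)).foldl
          (fun d p => d.set p.1.toNat ((PySem.List.count p.2 1 : Nat) : Int)) d
        = pvFillDegrees m i d := by
  intro m
  induction m with
  | nil => intro i d; simp [PySem.List.enumerate_nil, pvFillDegrees]
  | cons r rest ih =>
    intro i d
    rw [PySem.List.enumerate_cons]
    simp only [List.foldl_cons, pvFillDegrees, Int.toNat_natCast]
    have h1 : ((i : Int) + 1) = ((i + 1 : Nat) : Int) := by push_cast; ring
    rw [h1, ih]

lemma fillB_eq_fill (m : List (List Int)) (d : List Int) :
    (PySem.List.pyRange 0 m.length 1).foldl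
        (fun d i => d.set i.toNat ((PySem.List.count (PySem.List.pyGetD m i []) 1 : Nat) : Int)) d
      = pvFillDegrees m 0 d := by
  have he := PySem.List.enumerate_eq_map_pyRange m ([] : List Int)
  rw [show PySem.List.len m = (m.length : Int) from rfl] at he
  have hf := List.foldl_map (f := fun j => (j, PySem.List.pyGetD m j []))
    (g := fun (d : List Int) (p : Int × List Int) => d.set p.1.toNat ((PySem.List.count p.2 1 : Nat) : Int))
    (l := PySem.List.pyRange 0 (m.length : Int) 1) (init := d)
  rw [← hf, ← he]
  have h0 : ((0 : Nat) : Int) = (0 : Int) := rfl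
  rw [← h0, foldl_enumerate_set m 0 d]

lemma dict_keys_length_eq_size (d : PySem.Dict Int Int) : d.keys.length = d.size := by
  simp [PySem.Dict.keys, PySem.Dict.size]

lemma pvDictEq_iff_counts (h1 h2 : PySem.Dict Int Int) (l1 l2 : List Int)
    (nd1 : h1.keys.Nodup) (nd2 : h2.keys.Nodup)
    (g1 : ∀ v, h1.getD v 0 = (l1.count v : Int)) (g2 : ∀ v, h2.getD v 0 = (l2.count v : Int))
    (k1 : ∀ v, v ∈ h1.keys ↔ v ∈ l1) (k2 : ∀ v, v ∈ h2.keys ↔ v ∈ l2) :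
    pvDictEq h1 h2 = true ↔ ∀ v, l1.count v = l2.count v := by
  simp only [pvDictEq, Bool.and_eq_true, beq_iff_eq, List.all_eq_true]
  rw [PySem.Dict.items_eq_map_keys h1 nd1 0]
  constructor
  · rintro ⟨hsize, hall⟩
    have hagree : ∀ k ∈ h1.keys, h2.get? k = some (h1.getD k 0) := by
      intro k hk
      have := hall (k, h1.getD k 0) (List.mem_map_of_mem hk)
      simpa using this
    have hsub : h1.keys ⊆ h2.keys := by
      intro k hk
      have h := hagree k hk
      by_contra hnk
      rw [← PySem.Dict.get?_eq_none_iff_not_mem_keys] at hnk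
      rw [hnk] at h
      simp at h
    have hperm : h1.keys.Perm h2.keys := by
      refine (nd1.subperm hsub).perm_of_length_le ?_
      rw [dict_keys_length_eq_size, dict_keys_length_eq_size, hsize]
    intro v
    by_cases hv1 : v ∈ h1.keys
    · have h := hagree v hv1
      have heq : h2.getD v 0 = h1.getD v 0 := by
        rw [PySem.Dict.getD_eq_get?_getD, h]
        rfl
      have hc : ((l1.count v : Int)) = ((l2.count v : Int)) := by
        rw [← g1, ← g2, heq]
      exact_mod_cast hc
    · have hv2 : v ∉ h2.keys := fun h => hv1 (hperm.mem_iff.mpr h)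
      rw [k1] at hv1
      rw [k2] at hv2
      rw [List.count_eq_zero_of_not_mem hv1, List.count_eq_zero_of_not_mem hv2]
  · intro hcount
    have hmem : ∀ v, v ∈ h1.keys ↔ v ∈ h2.keys := by
      intro v
      rw [k1, k2, ← List.count_pos_iff, ← List.count_pos_iff, hcount v]
    have hperm : h1.keys.Perm h2.keys := (List.perm_ext_iff_of_nodup nd1 nd2).mpr hmem
    constructor
    · rw [← dict_keys_length_eq_size, ← dict_keys_length_eq_size]
      exact hperm.length_eq
    · rintro ⟨k, w⟩ hkw
      rcases List.mem_map.mp hkw with ⟨k', hk', hkeq⟩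
      obtain ⟨rfl, rfl⟩ : k' = k ∧ h1.getD k' 0 = w := by
        constructor
        · exact congrArg Prod.fst hkeq
        · exact congrArg Prod.snd hkeq
      have hk2 : k' ∈ h2.keys := (hmem k').mp hk'
      have hsome : ∃ w', h2.get? k' = some w' := by
        cases hg : h2.get? k' with
        | none => exact absurd ((PySem.Dict.get?_eq_none_iff_not_mem_keys _ _).mp hg) (by simpa using hk2)
        | some w' => exact ⟨w', rfl⟩
      rcases hsome with ⟨w', hg⟩
      have hgd : h2.getD k' 0 = w' := by
        rw [PySem.Dict.getD_eq_get?_getD, hg]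
        rfl
      have hww : h1.getD k' 0 = h2.getD k' 0 := by
        rw [g1, g2, hcount k']
      have hw' : w' = h1.getD k' 0 := by
        rw [← hgd, ← hww]
      rw [hg, hw']

lemma pvDictEq_counter_iff (l1 l2 : List Int) :
    pvDictEq (PySem.Dict.counter l1) (PySem.Dict.counter l2) = true
      ↔ ∀ v, l1.count v = l2.count v := by
  refine pvDictEq_iff_counts _ _ l1 l2 (PySem.Dict.nodup_keys_counter l1)
    (PySem.Dict.nodup_keys_counter l2) (fun v => PySem.Dict.getD_counter l1 v)
    (fun v => PySem.Dict.getD_counter l2 v) ?_ ?_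
  · intro v
    rw [PySem.Dict.keys_counter]
    exact PySem.Set.mem_ofList _ _
  · intro v
    rw [PySem.Dict.keys_counter]
    exact PySem.Set.mem_ofList _ _

lemma mergeSort_eq_iff_perm (l1 l2 : List Int) :
    (l1.mergeSort (fun a b => decide (a ≤ b)) == l2.mergeSort (fun a b => decide (a ≤ b))) = true
      ↔ l1.Perm l2 := by
  rw [beq_iff_eq]
  constructor
  · intro h
    exact (l1.mergeSort_perm _).symm.trans (h ▸ l2.mergeSort_perm (fun a b => decide (a ≤ b)))
  · intro h
    have hs1 := List.pairwise_mergeSort (le := fun a b : Int => decide (a ≤ b))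
      (fun a b c hab hbc => by simp at *; omega) (fun a b => by simp; omega) l1
    have hs2 := List.pairwise_mergeSort (le := fun a b : Int => decide (a ≤ b))
      (fun a b c hab hbc => by simp at *; omega) (fun a b => by simp; omega) l2
    refine List.Perm.eq_of_pairwise (le := fun a b : Int => a ≤ b)
      (fun a b _ _ hab hba => le_antisymm hab hba) ?_ ?_ ?_
    · exact hs1.imp (by simp)
    · exact hs2.imp (by simp)
    · exact (l1.mergeSort_perm _).trans (h.trans (l2.mergeSort_perm _).symm)

-- ===== VERDICT (by name: the statement is the Claim_ definition above) =====
theorem check_degree_of_graphs_spec : Claim_equal_check_degree_of_graphs := by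
  intro m1 m2 n1 n2 _ _
  unfold Spec_check_degree_of_graphs check_degree_of_graphs check_degree_of_graphs_alt
    pvDegreeHistogram
  dsimp only
  rw [fillB_eq_fill, fillB_eq_fill,
    PySem.Dict.foldl_insert_getD_add_one_eq_counter, PySem.Dict.foldl_insert_getD_add_one_eq_counter]
  rw [Bool.eq_iff_iff, mergeSort_eq_iff_perm, pvDictEq_counter_iff]
  exact List.perm_iff_count
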